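-- pv_equiv track=rewrite | github.com/door2u/Python | Pyth/Blen/Blen.py | SpliRead
-- ===== SOURCE A (Python) =====
-- def SpliRead(charName = ""):
-- 	spliList = []
-- 	spliList.append(charName + "." + "head.m")
-- 	spliList.append(charName + "." + "wris.l")
-- 	spliList.append(charName + "." + "elbo.l")
-- 	spliList.append(charName + "." + "shou.l")
-- 	spliList.append(charName + "." + "ankl.l")
-- 	spliList.append(charName + "." + "knee.l")
-- 	spliList.append(charName + "." + "hip_.l")
-- 	spliList.append(charName + "." + "wris.r")
-- 	spliList.append(charName + "." + "elbo.r")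
-- 	spliList.append(charName + "." + "shou.r")
-- 	spliList.append(charName + "." + "ankl.r")
-- 	spliList.append(charName + "." + "knee.r")
-- 	spliList.append(charName + "." + "hip_.r")
-- 	switList = []
-- 	for a in range(len(spliList)):
-- 		switList.append(False)
-- 	pareDict = {}
-- 	pareDict.update({charName + "." + "head.m": charName + "." + "body"})
-- 	pareDict.update({charName + "." + "wris.l": charName + "." + "elbo.l"})
-- 	pareDict.update({charName + "." + "elbo.l": charName + "." + "shou.l"})
-- 	pareDict.update({charName + "." + "shou.l": charName + "." + "body"})
-- 	pareDict.update({charName + "." + "ankl.l": charName + "." + "knee.l"})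
-- 	pareDict.update({charName + "." + "knee.l": charName + "." + "hip_.l"})
-- 	pareDict.update({charName + "." + "hip_.l": charName + "." + "body"})
-- 	pareDict.update({charName + "." + "wris.r": charName + "." + "elbo.r"})
-- 	pareDict.update({charName + "." + "elbo.r": charName + "." + "shou.r"})
-- 	pareDict.update({charName + "." + "shou.r": charName + "." + "body"})
-- 	pareDict.update({charName + "." + "ankl.r": charName + "." + "knee.r"})
-- 	pareDict.update({charName + "." + "knee.r": charName + "." + "hip_.r"})
-- 	pareDict.update({charName + "." + "hip_.r": charName + "." + "body"})
-- 	flipList = []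
-- 	flipList.append([False, True])
-- 	flipList.append([False, True])
-- 	flipList.append([True, False])
-- 	flipList.append([True, False])
-- 	flipList.append([False, True])
-- 	flipList.append([True, False])
-- 	flipList.append([True, False])
-- 	flipList.append([True, False])
-- 	flipList.append([False, True])
-- 	flipList.append([False, True])
-- 	flipList.append([True, False])
-- 	flipList.append([False, True])
-- 	flipList.append([False, True])
-- 	return spliList, switList, pareDict, flipList
-- ===== SOURCE B (Python) =====
-- # B: generates the skeleton from left-side limb chains only; the right side is
-- # produced by mirroring (suffix .l -> .r, flip pair negated), and parents are
-- # derived from the chain structure (next joint in the chain, else "body").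
-- HEAD = [("head.m", (False, True))]
-- ARM = [("wris", (False, True)), ("elbo", (True, False)), ("shou", (True, False))]
-- LEG = [("ankl", (False, True)), ("knee", (True, False)), ("hip_", (True, False))]
--
-- def _side(chain, s):
--     if s == "l":
--         return [(j + ".l", f) for j, f in chain]
--     return [(j + ".r", (not f[0], not f[1])) for j, f in chain]
--
-- def SpliRead(charName = ""):
--     chains = [HEAD, _side(ARM, "l"), _side(LEG, "l"), _side(ARM, "r"), _side(LEG, "r")]
--     spliList, switList, pareDict, flipList = [], [], {}, []
--     for chain in chains:
--         for i, (suf, flip) in enumerate(chain):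
--             name = charName + "." + suf
--             parent = chain[i + 1][0] if i + 1 < len(chain) else "body"
--             spliList.append(name)
--             switList.append(False)
--             pareDict[name] = charName + "." + parent
--             flipList.append(list(flip))
--     return spliList, switList, pareDict, flipList
-- ===== Notes on version B (the rewrite author's own statement) =====
-- stated objective: simpler
-- what changed: Instead of four hard-coded blocks enumerating all 13 bones, B stores only the left-side limb chains with their flips, generates the right side by mirroring (suffix .l->.r, flip pair negated), and derives each parent from chain adjacency (next joint in the chain, else 'body'), building all four outputs in one pass.
import Mathlib
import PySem

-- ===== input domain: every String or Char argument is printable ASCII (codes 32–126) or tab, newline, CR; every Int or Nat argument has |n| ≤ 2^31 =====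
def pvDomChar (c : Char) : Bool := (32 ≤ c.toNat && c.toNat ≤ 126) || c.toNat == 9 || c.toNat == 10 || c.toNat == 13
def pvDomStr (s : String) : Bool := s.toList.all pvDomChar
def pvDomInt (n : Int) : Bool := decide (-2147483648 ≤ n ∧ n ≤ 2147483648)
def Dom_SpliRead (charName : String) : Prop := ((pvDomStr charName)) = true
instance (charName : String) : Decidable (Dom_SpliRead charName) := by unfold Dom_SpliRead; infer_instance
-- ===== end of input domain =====

-- B derives the skeleton from left-side limb chains only — the right side is generated by
-- mirroring (suffix and negated flips) and parents come from chain adjacency (objective: simpler).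


-- ===== PORT A =====
def SpliRead (charName : String) : List String × List Bool × (List (String × String)) × List (List Bool) :=
  let spliList : List String :=
    [charName ++ "." ++ "head.m", charName ++ "." ++ "wris.l", charName ++ "." ++ "elbo.l",
     charName ++ "." ++ "shou.l", charName ++ "." ++ "ankl.l", charName ++ "." ++ "knee.l",
     charName ++ "." ++ "hip_.l", charName ++ "." ++ "wris.r", charName ++ "." ++ "elbo.r",
     charName ++ "." ++ "shou.r", charName ++ "." ++ "ankl.r", charName ++ "." ++ "knee.r",
     charName ++ "." ++ "hip_.r"]
  let switList : List Bool :=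
    (PySem.List.pyRange 0 spliList.length 1).foldl (fun acc _ => acc ++ [false]) []
  let pareDict : PySem.Dict String String :=
    (((((((((((((PySem.Dict.empty.insert (charName ++ "." ++ "head.m") (charName ++ "." ++ "body")).insert
      (charName ++ "." ++ "wris.l") (charName ++ "." ++ "elbo.l")).insert
      (charName ++ "." ++ "elbo.l") (charName ++ "." ++ "shou.l")).insert
      (charName ++ "." ++ "shou.l") (charName ++ "." ++ "body")).insert
      (charName ++ "." ++ "ankl.l") (charName ++ "." ++ "knee.l")).insert
      (charName ++ "." ++ "knee.l") (charName ++ "." ++ "hip_.l")).insert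
      (charName ++ "." ++ "hip_.l") (charName ++ "." ++ "body")).insert
      (charName ++ "." ++ "wris.r") (charName ++ "." ++ "elbo.r")).insert
      (charName ++ "." ++ "elbo.r") (charName ++ "." ++ "shou.r")).insert
      (charName ++ "." ++ "shou.r") (charName ++ "." ++ "body")).insert
      (charName ++ "." ++ "ankl.r") (charName ++ "." ++ "knee.r")).insert
      (charName ++ "." ++ "knee.r") (charName ++ "." ++ "hip_.r")).insert
      (charName ++ "." ++ "hip_.r") (charName ++ "." ++ "body"))
  let flipList : List (List Bool) :=
    [[false, true], [false, true], [true, false], [true, false], [false, true],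
     [true, false], [true, false], [true, false], [false, true], [false, true],
     [true, false], [false, true], [false, true]]
  (spliList, switList, pareDict.items, flipList)

-- ===== PORT B =====
-- extremity-to-body joint chains, left-side flips only
def pvHEAD : List (String × Bool × Bool) := [("head.m", false, true)]
def pvARM : List (String × Bool × Bool) := [("wris", false, true), ("elbo", true, false), ("shou", true, false)]
def pvLEG : List (String × Bool × Bool) := [("ankl", false, true), ("knee", true, false), ("hip_", true, false)]

-- _side: attach side suffix; the right side mirrors the flips
def pvSide (chain : List (String × Bool × Bool)) (s : String) : List (String × Bool × Bool) :=
  if s == "l" then chain.map (fun p => (p.1 ++ ".l", p.2))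
  else chain.map (fun p => (p.1 ++ ".r", !p.2.1, !p.2.2))

def SpliRead_alt (charName : String) : List String × List Bool × (List (String × String)) × List (List Bool) :=
  let chains := [pvHEAD, pvSide pvARM "l", pvSide pvLEG "l", pvSide pvARM "r", pvSide pvLEG "r"]
  let st := chains.foldl
    (fun (st : List String × List Bool × PySem.Dict String String × List (List Bool)) chain =>
      (PySem.List.enumerate chain).foldl
        (fun st e =>
          let (i, suf, flip) := e
          let (spliList, switList, pareDict, flipList) := st
          let name := charName ++ "." ++ suf
          let parent := if i + 1 < (chain.length : Int)
                        then (PySem.List.pyGetD chain (i + 1) ("", false, false)).1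
                        else "body"
          (spliList ++ [name], switList ++ [false],
           pareDict.insert name (charName ++ "." ++ parent), flipList ++ [[flip.1, flip.2]]))
        st)
    ([], [], PySem.Dict.empty, [])
  (st.1, st.2.1, st.2.2.1.items, st.2.2.2)

-- ===== PRECONDITION & SPEC =====
def Spec_SpliRead (charName : String) (out : List String × List Bool × (List (String × String)) × List (List Bool)) : Prop := out = SpliRead_alt charName
instance (charName : String) (out : List String × List Bool × (List (String × String)) × List (List Bool)) : Decidable (Spec_SpliRead charName out) := by unfold Spec_SpliRead; infer_instance

-- ===== CLAIM (what is proved, stated in full; the proofs are below) =====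
def Claim_equal_SpliRead : Prop := ∀ (charName : String), Dom_SpliRead charName → Spec_SpliRead charName (SpliRead charName)

-- ===== LEMMAS AND PROOFS =====

-- A's switch list folds over pyRange and B's loop folds over enumerate (both built by
-- well-founded recursion, not defeq-reducible); rewrite both away, then the two ports
-- agree definitionally component by component.
theorem SpliRead_eq (c : String) : SpliRead c = SpliRead_alt c := by
  simp only [SpliRead, SpliRead_alt, pvSide, pvHEAD, pvARM, pvLEG, List.map,
    beq_iff_eq, String.reduceEq, String.reduceAppend, reduceIte, List.length_cons, List.length_nil]
  simp only [PySem.List.enumerate_cons, PySem.List.enumerate_nil, List.foldl]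
  norm_num [PySem.List.pyRange_one_cons, PySem.List.pyGetD, PySem.List.pyGet?, PySem.List.pyIdx?]
  rfl

-- ===== VERDICT (by name: the statement is the Claim_ definition above) =====
theorem SpliRead_spec : Claim_equal_SpliRead := by
  intro charName _
  exact SpliRead_eq charName
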